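-- pv_equiv track=rewrite | github.com/CT-affairs/Dailyreport_test | invoice-ocr/main.py | _compute_invoice_status_from_line_items
-- ===== SOURCE A (Python) =====
-- def _compute_invoice_status_from_line_items(line_items: list) -> str:
--     """明細は pending / checked のみ想定。一部のみ checked のときは confirming。"""
--     if not line_items:
--         return "pending"
--     checked = 0
--     for li in line_items:
--         st = (li or {}).get("status") or "pending"
--         if st == "editing":
--             st = "pending"
--         if st == "checked":
--             checked += 1
--     if checked == 0:
--         return "pending"
--     if checked == len(line_items):
--         return "checked"
--     return "confirming"
-- ===== SOURCE B (Python) =====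
-- def _normalize_status(li):
--     st = (li or {}).get("status") or "pending"
--     return "pending" if st == "editing" else st
--
--
-- def _compute_invoice_status_from_line_items(line_items: list) -> str:
--     statuses = {_normalize_status(li) for li in line_items}
--     if not statuses:
--         return "pending"
--     if statuses == {"checked"}:
--         return "checked"
--     if "checked" in statuses:
--         return "confirming"
--     return "pending"
-- ===== Notes on version B (the rewrite author's own statement) =====
-- stated objective: simpler
-- what changed: B collects the set of distinct normalized statuses in one comprehension and decides by set contents (empty -> pending, == {'checked'} -> checked, contains 'checked' -> confirming, else pending) instead of A's running count of checked items compared against 0 and len(line_items).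
import Mathlib
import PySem

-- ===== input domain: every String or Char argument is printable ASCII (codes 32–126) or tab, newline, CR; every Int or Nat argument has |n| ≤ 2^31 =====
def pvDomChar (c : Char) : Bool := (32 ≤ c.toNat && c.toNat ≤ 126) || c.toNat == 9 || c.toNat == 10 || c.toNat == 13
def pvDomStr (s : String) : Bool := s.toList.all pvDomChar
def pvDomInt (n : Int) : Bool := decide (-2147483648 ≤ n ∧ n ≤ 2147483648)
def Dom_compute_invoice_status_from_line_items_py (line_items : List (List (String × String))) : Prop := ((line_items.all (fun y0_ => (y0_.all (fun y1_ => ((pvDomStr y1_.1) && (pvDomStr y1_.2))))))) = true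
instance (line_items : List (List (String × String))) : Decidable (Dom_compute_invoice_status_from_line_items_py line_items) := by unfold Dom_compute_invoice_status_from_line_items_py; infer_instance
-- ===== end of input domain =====

-- B replaces A's running checked-counter with the set of distinct normalized statuses,
-- deciding by set contents instead of count comparisons (objective: simpler).

-- ===== PORT A =====
def compute_invoice_status_from_line_items_py (line_items : List (List (String × String))) : String :=
  if line_items = [] then "pending" else
  let checked : Int := line_items.foldl (fun checked li =>
    -- st = (li or {}).get("status") or "pending"
    let st := match PySem.Dict.get? (if li = [] then PySem.Dict.empty else PySem.Dict.mk li) "status" with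
      | some s => if s = "" then "pending" else s
      | none => "pending"
    let st := if st = "editing" then "pending" else st
    if st = "checked" then checked + 1 else checked) 0
  if checked = 0 then "pending"
  else if checked = (line_items.length : Int) then "checked"
  else "confirming"

-- ===== PORT B =====
def pvNormalizeStatus (li : List (String × String)) : String :=
  let st := match PySem.Dict.get? (if li = [] then PySem.Dict.empty else PySem.Dict.mk li) "status" with
    | some s => if s = "" then "pending" else s
    | none => "pending"
  if st = "editing" then "pending" else st

def compute_invoice_status_from_line_items_py_alt (line_items : List (List (String × String))) : String :=
  let statuses : PySem.Set String := PySem.Set.ofList (line_items.map pvNormalizeStatus)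
  if statuses = [] then "pending"
  else if PySem.Set.equal statuses ["checked"] then "checked"
  else if PySem.Set.contains statuses "checked" then "confirming"
  else "pending"

-- ===== PRECONDITION & SPEC =====
def Spec_compute_invoice_status_from_line_items_py (line_items : List (List (String × String))) (out : String) : Prop := out = compute_invoice_status_from_line_items_py_alt line_items
instance (line_items : List (List (String × String))) (out : String) : Decidable (Spec_compute_invoice_status_from_line_items_py line_items out) := by unfold Spec_compute_invoice_status_from_line_items_py; infer_instance

-- ===== CLAIM (what is proved, stated in full; the proofs are below) =====
def Claim_equal_compute_invoice_status_from_line_items_py : Prop := ∀ (line_items : List (List (String × String))), Dom_compute_invoice_status_from_line_items_py line_items → Spec_compute_invoice_status_from_line_items_py line_items (compute_invoice_status_from_line_items_py line_items)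

-- ===== LEMMAS AND PROOFS =====

theorem pv_foldl_count (l : List (List (String × String))) (acc : Int) :
    l.foldl (fun checked li =>
      let st := match PySem.Dict.get? (if li = [] then PySem.Dict.empty else PySem.Dict.mk li) "status" with
        | some s => if s = "" then "pending" else s
        | none => "pending"
      let st := if st = "editing" then "pending" else st
      if st = "checked" then checked + 1 else checked) acc
    = acc + ((l.countP (fun li => pvNormalizeStatus li == "checked") : Nat) : Int) := by
  have h : (fun (checked : Int) (li : List (String × String)) =>
      let st := match PySem.Dict.get? (if li = [] then PySem.Dict.empty else PySem.Dict.mk li) "status" with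
        | some s => if s = "" then "pending" else s
        | none => "pending"
      let st := if st = "editing" then "pending" else st
      if st = "checked" then checked + 1 else checked)
    = (fun (checked : Int) li => if pvNormalizeStatus li = "checked" then checked + 1 else checked) := rfl
  rw [h]
  induction l generalizing acc with
  | nil => simp
  | cons hd tl ih =>
    rw [List.foldl_cons, List.countP_cons, ih]
    by_cases hc : pvNormalizeStatus hd = "checked" <;> simp [hc] <;> omega

theorem compute_invoice_status_from_line_items_py_spec : Claim_equal_compute_invoice_status_from_line_items_py := by
  intro l _
  unfold Spec_compute_invoice_status_from_line_items_py
  unfold compute_invoice_status_from_line_items_py compute_invoice_status_from_line_items_py_alt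
  rcases eq_or_ne l [] with rfl | hne
  · simp
  simp only [if_neg hne, pv_foldl_count, zero_add]
  set p : List (String × String) → Bool := fun li => pvNormalizeStatus li == "checked" with hp
  set S := PySem.Set.ofList (l.map pvNormalizeStatus) with hS
  have hSne : S ≠ [] := by
    intro h
    rcases l with _ | ⟨a, l'⟩
    · exact hne rfl
    · have : pvNormalizeStatus a ∈ S := by
        rw [hS]; exact (PySem.Set.mem_ofList _ _).mpr (by simp)
      simp [h] at this
  have hmemS : ∀ x, x ∈ S ↔ x ∈ l.map pvNormalizeStatus := fun x => PySem.Set.mem_ofList _ _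
  rw [if_neg hSne]
  by_cases h0 : l.countP p = 0
  · -- no checked item: S does not contain "checked"
    have hnc : ∀ li ∈ l, pvNormalizeStatus li ≠ "checked" := by
      intro li hli
      have := (List.countP_eq_zero.mp h0) li hli
      simpa [hp] using this
    have hnotmem : "checked" ∉ S := by
      rw [hmemS]; simp only [List.mem_map]
      rintro ⟨li, hli, hch⟩; exact hnc li hli hch
    have heq : PySem.Set.equal S ["checked"] ≠ true := by
      intro h
      exact hnotmem (((PySem.Set.equal_iff _ _).mp h "checked").mpr (by simp))
    simp [h0, heq, hnotmem]
  · by_cases hall : l.countP p = l.length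
    · -- every item checked: S = set containing exactly "checked"
      have hallc : ∀ li ∈ l, pvNormalizeStatus li = "checked" := by
        intro li hli
        have := (List.countP_eq_length.mp hall) li hli
        simpa [hp] using this
      have heq : PySem.Set.equal S ["checked"] = true := by
        rw [PySem.Set.equal_iff _ _]
        intro x
        constructor
        · intro hx
          rcases List.mem_map.mp ((hmemS x).mp hx) with ⟨li, hli, rfl⟩
          simp [hallc li hli]
        · intro hx
          simp only [List.mem_singleton] at hx
          subst hx
          rcases l with _ | ⟨a, l'⟩
          · exact absurd rfl hne
          · rw [hmemS]
            exact List.mem_map.mpr ⟨a, by simp, hallc a (by simp)⟩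
      have h0' : (l.countP p : Int) ≠ 0 := by exact_mod_cast h0
      simp [heq, hall, hne]
    · -- some but not all checked
      have hex : ∃ li ∈ l, pvNormalizeStatus li = "checked" := by
        by_contra hno
        push Not at hno
        exact h0 (List.countP_eq_zero.mpr (by intro li hli; simpa [hp] using hno li hli))
      have hexn : ∃ li ∈ l, pvNormalizeStatus li ≠ "checked" := by
        by_contra hno
        push Not at hno
        exact hall (List.countP_eq_length.mpr (by intro li hli; simpa [hp] using hno li hli))
      have hmem : "checked" ∈ S := by
        rw [hmemS]
        rcases hex with ⟨li, hli, hch⟩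
        exact List.mem_map.mpr ⟨li, hli, hch⟩
      have heq : PySem.Set.equal S ["checked"] ≠ true := by
        intro h
        rcases hexn with ⟨li, hli, hch⟩
        have : pvNormalizeStatus li ∈ S := (hmemS _).mpr (List.mem_map.mpr ⟨li, hli, rfl⟩)
        have := ((PySem.Set.equal_iff _ _).mp h _).mp this
        simp only [List.mem_singleton] at this
        exact hch this
      have h0' : (l.countP p : Int) ≠ 0 := by exact_mod_cast h0
      have hall' : (l.countP p : Int) ≠ (l.length : Int) := by exact_mod_cast hall
      simp [hall', heq, hmem]
      rcases hex with ⟨li, hli, hch⟩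
      exact ⟨li, hli, by simp [hp, hch]⟩
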